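-- pv_equiv track=rewrite | github.com/bfaltrep/VisualNovel | game/subgames/2048.py | treat_line
-- ===== SOURCE A (Python) =====
-- def treat_line(liste):
--     y = 0
--     while y < len(liste)-1:
--         if liste[y] == liste[y+1]:
--             liste[y] = liste[y]*2
--             del liste[y+1]
--         y += 1
--     while len(liste) < 4:
--         liste.append(0)
--     return liste
-- ===== SOURCE B (Python) =====
-- def treat_line(liste):
--     # Single index scan building the merged line into a fresh list, then pad once;
--     # mutates liste in place like A.
--     res = []
--     n = len(liste)
--     i = 0
--     while i < n:
--         if i + 1 < n and liste[i] == liste[i + 1]: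
--             res.append(liste[i] * 2)
--             i += 2
--         else:
--             res.append(liste[i])
--             i += 1
--     res += [0] * (4 - len(res))
--     liste[:] = res
--     return liste
-- ===== Notes on version B (the rewrite author's own statement) =====
-- stated objective: simpler
-- what changed: Replaces A's in-place index walk with del-based compaction by a single index scan that appends merged values to a fresh output list, pads it once and assigns it back in place.
import Mathlib
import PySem

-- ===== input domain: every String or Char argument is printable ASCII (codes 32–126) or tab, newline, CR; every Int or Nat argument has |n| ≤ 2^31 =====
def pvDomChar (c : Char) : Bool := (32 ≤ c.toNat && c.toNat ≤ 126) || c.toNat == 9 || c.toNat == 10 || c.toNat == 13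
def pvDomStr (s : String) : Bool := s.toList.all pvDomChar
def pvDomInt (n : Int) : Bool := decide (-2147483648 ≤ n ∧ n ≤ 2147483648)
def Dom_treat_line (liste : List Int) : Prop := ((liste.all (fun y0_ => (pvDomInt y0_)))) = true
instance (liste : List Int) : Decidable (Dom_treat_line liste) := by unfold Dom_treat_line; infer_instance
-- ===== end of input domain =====

-- B replaces A's in-place del-based compaction by a single index scan that builds the merged
-- line into a fresh list and pads it once (objective: simpler). A mutates its argument in
-- place; B performs the same in-place assignment; the Lean claim is about the return value.


-- ===== PORT A =====
-- 'while y < len(liste)-1': on equal neighbours, double liste[y] and delete liste[y+1]; y += 1.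
-- Structural fuel (liste.length bounds the iteration count len(liste)-1-y; a totality guard only).
def treatLoopA : Nat → List Int → Nat → List Int
  | 0, l, _ => l
  | fuel + 1, l, y =>
    if h : y + 1 < l.length then
      if l[y]'(by omega) = l[y + 1]'h then
        treatLoopA fuel ((l.set y (l[y]'(by omega) * 2)).eraseIdx (y + 1)) (y + 1)
      else
        treatLoopA fuel l (y + 1)
    else l

-- 'while len(liste) < 4: liste.append(0)' (fuel 4 bounds the appends; a totality guard only).
def treatPadA : Nat → List Int → List Int
  | 0, l => l
  | fuel + 1, l => if l.length < 4 then treatPadA fuel (l ++ [0]) else l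

def treat_line (liste : List Int) : List Int :=
  treatPadA 4 (treatLoopA liste.length liste 0)

-- ===== PORT B =====
-- 'while i < n:' index scan appending to res; equal pair at i → append the doubled
-- value and i += 2, else append liste[i] and i += 1.
-- Structural fuel (n - i iterations at most n; a totality guard only).
def mergeLoopB (l : List Int) : Nat → Nat → List Int → List Int
  | 0, _, res => res
  | fuel + 1, i, res =>
    if h : i < l.length then
      if h2 : i + 1 < l.length then
        if l[i]'h = l[i + 1]'h2 then mergeLoopB l fuel (i + 2) (res ++ [l[i]'h * 2])
        else mergeLoopB l fuel (i + 1) (res ++ [l[i]'h])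
      else mergeLoopB l fuel (i + 1) (res ++ [l[i]'h])
    else res

def treat_line_alt (liste : List Int) : List Int :=
  let res := mergeLoopB liste liste.length 0 []
  res ++ List.replicate (4 - res.length) 0

-- ===== PRECONDITION & SPEC =====
def Spec_treat_line (liste : List Int) (out : List Int) : Prop := out = treat_line_alt liste
instance (liste : List Int) (out : List Int) : Decidable (Spec_treat_line liste out) := by unfold Spec_treat_line; infer_instance

-- ===== CLAIM (what is proved, stated in full; the proofs are below) =====
def Claim_equal_treat_line : Prop := ∀ (liste : List Int), Dom_treat_line liste → Spec_treat_line liste (treat_line liste)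

-- ===== LEMMAS AND PROOFS =====

-- the pure pair-merge: mergeLoopB with its accumulator made explicit (proof helper only)
def mergeB : List Int → List Int
  | a :: b :: t => if a = b then a * 2 :: mergeB t else a :: mergeB (b :: t)
  | l => l

theorem mergeLoopB_eq (l : List Int) (fuel i : Nat) (res : List Int)
    (hf : l.length - i ≤ fuel) :
    mergeLoopB l fuel i res = res ++ mergeB (l.drop i) := by
  induction fuel generalizing i res with
  | zero =>
    have hd : l.drop i = [] := List.drop_eq_nil_of_le (by omega)
    simp [mergeLoopB, hd, mergeB]
  | succ fuel ih =>
    simp only [mergeLoopB]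
    by_cases h : i < l.length
    · rw [dif_pos h]
      have hd1 : l.drop i = l[i]'h :: l.drop (i + 1) := List.drop_eq_getElem_cons h
      by_cases h2 : i + 1 < l.length
      · rw [dif_pos h2]
        have hd2 : l.drop (i + 1) = l[i + 1]'h2 :: l.drop (i + 2) :=
          List.drop_eq_getElem_cons h2
        by_cases he : l[i]'h = l[i + 1]'h2
        · rw [if_pos he, ih (i + 2) _ (by omega)]
          rw [hd1, hd2]
          simp [mergeB, he]
        · rw [if_neg he, ih (i + 1) _ (by omega)]
          rw [hd1, hd2]
          simp only [mergeB]
          rw [if_neg he]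
          simp
      · rw [dif_neg h2, ih (i + 1) _ (by omega)]
        have hd2 : l.drop (i + 1) = [] := List.drop_eq_nil_of_le (by omega)
        rw [hd1, hd2]
        simp [mergeB]
    · rw [dif_neg h]
      have hd : l.drop i = [] := List.drop_eq_nil_of_le (by omega)
      simp [hd, mergeB]

theorem eraseIdx_append_len (s : List Int) (b : Int) (t : List Int) :
    (s ++ b :: t).eraseIdx s.length = s ++ t := by
  induction s with
  | nil => rfl
  | cons x s ih => simp [ih]

-- Invariant of A's while loop: with the first 'done.length' elements settled and enough
-- fuel left, the loop produces 'done' followed by the pair-merge of the remainder.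
theorem treatLoopA_eq (fuel : Nat) (rest done : List Int) (hf : rest.length ≤ fuel) :
    treatLoopA fuel (done ++ rest) done.length = done ++ mergeB rest := by
  induction fuel generalizing rest done with
  | zero =>
    match rest with
    | [] => simp [treatLoopA, mergeB]
    | _ :: _ => simp at hf
  | succ fuel ih =>
    match rest with
    | [] => simp [treatLoopA, mergeB]
    | [a] =>
      simp only [treatLoopA, mergeB]
      rw [dif_neg (by simp)]
    | a :: b :: t =>
      have hlt : done.length + 1 < (done ++ a :: b :: t).length := by
        simp only [List.length_append, List.length_cons]; omega
      have hga : (done ++ a :: b :: t)[done.length]'(by omega) = a := by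
        simp
      have hgb : (done ++ a :: b :: t)[done.length + 1]'hlt = b := by
        rw [List.getElem_append_right (by omega)]
        simp
      simp only [treatLoopA]
      rw [dif_pos hlt]
      by_cases hab : a = b
      · rw [if_pos (by rw [hga, hgb]; exact hab)]
        have hset : (done ++ a :: b :: t).set done.length
            ((done ++ a :: b :: t)[done.length]'(by omega) * 2) = (done ++ [a * 2]) ++ b :: t := by
          rw [hga]; simp
        rw [hset]
        have herase : ((done ++ [a * 2]) ++ b :: t).eraseIdx (done.length + 1)
            = (done ++ [a * 2]) ++ t := by
          have h := eraseIdx_append_len (done ++ [a * 2]) b t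
          simpa using h
        rw [herase]
        have hrec := ih t (done ++ [a * 2]) (by simp at hf ⊢; omega)
        rw [show (done ++ [a * 2]).length = done.length + 1 by simp] at hrec
        rw [hrec]
        simp [mergeB, hab]
      · rw [if_neg (by rw [hga, hgb]; exact hab)]
        have hrec := ih (b :: t) (done ++ [a]) (by simp at hf ⊢; omega)
        rw [show (done ++ [a]).length = done.length + 1 by simp] at hrec
        rw [show done ++ a :: b :: t = (done ++ [a]) ++ b :: t by simp, hrec]
        simp [mergeB, hab]

-- A's padding loop equals a single replicate-append (given enough fuel).
theorem treatPadA_eq (fuel : Nat) (l : List Int) (hf : 4 - l.length ≤ fuel) :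
    treatPadA fuel l = l ++ List.replicate (4 - l.length) 0 := by
  induction fuel generalizing l with
  | zero =>
    have h : 4 - l.length = 0 := by omega
    simp [treatPadA, h]
  | succ fuel ih =>
    simp only [treatPadA]
    split
    · rw [ih (l ++ [0]) (by simp; omega)]
      rw [show 4 - l.length = (4 - (l ++ [0]).length) + 1 by simp; omega]
      simp [List.replicate_succ]
    · rw [show 4 - l.length = 0 by omega]
      simp

-- ===== VERDICT (by name: the statement is the Claim_ definition above) =====
theorem treat_line_spec : Claim_equal_treat_line := by
  intro liste _
  show treat_line liste = treat_line_alt liste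
  unfold treat_line treat_line_alt
  have h0 := treatLoopA_eq liste.length liste [] (le_refl _)
  simp only [List.nil_append, List.length_nil] at h0
  rw [h0, treatPadA_eq 4 _ (by omega), mergeLoopB_eq liste liste.length 0 [] (by omega)]
  simp
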